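-- pv_equiv track=rewrite | github.com/TeT640/Tet | game_simulation1.py | hole_depth
-- ===== SOURCE A (Python) =====
-- def hole_depth(field):
--
--     total_depth = 0
--
--     for col in range(len(field[0])):  # Iterate through each column
--         for row in range(len(field)):  # Iterate through each row
--             if field[row][col] == 0:  # Hole detected
--                 # Count the number of full cells above the hole
--                 depth = 0
--                 for above_row in range(row):
--                     if field[above_row][col] != 0:
--                         depth += 1
--                 total_depth += depth
--
--     return total_depth
-- ===== SOURCE B (Python) =====
-- def hole_depth(field):
--     # Transpose once (zip(*field) truncates to the shortest row, which on
--     # rectangular-enough input is len(field[0])) and make one downward pass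
--     # per column carrying a running count of filled cells above.
--     total = 0
--     for col in zip(*field):
--         filled = 0
--         for x in col:
--             if x == 0:
--                 total += filled
--             else:
--                 filled += 1
--     return total
-- ===== Notes on version B (the rewrite author's own statement) =====
-- stated objective: alternative
-- what changed: Replaced the per-hole rescan of all cells above (a third nested loop) by a transpose (zip(*field)) and one downward pass per column carrying a running count of filled cells, adding the count at each hole.
import Mathlib
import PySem

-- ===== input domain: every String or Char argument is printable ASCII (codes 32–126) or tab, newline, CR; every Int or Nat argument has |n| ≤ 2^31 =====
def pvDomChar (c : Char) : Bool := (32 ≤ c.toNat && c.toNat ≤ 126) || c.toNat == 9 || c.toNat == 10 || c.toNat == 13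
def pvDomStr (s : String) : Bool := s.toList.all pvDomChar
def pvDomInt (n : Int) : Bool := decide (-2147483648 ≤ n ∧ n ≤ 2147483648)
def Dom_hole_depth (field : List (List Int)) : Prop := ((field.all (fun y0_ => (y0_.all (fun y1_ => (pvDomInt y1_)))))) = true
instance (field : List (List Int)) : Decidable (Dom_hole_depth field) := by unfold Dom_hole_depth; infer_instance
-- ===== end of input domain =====

-- B replaces A's per-hole rescan of the cells above by a transpose plus one
-- downward pass per column carrying a running count of filled cells.

-- ===== PORT A =====
-- Indexing field[row][col] is written with getD; under Pre_hole_depth every such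
-- access is in range, so the default is never taken (Python would raise there).
def hole_depth (field : List (List Int)) : Int :=
  (List.range (field.headD []).length).foldl (fun total_depth col =>
    (List.range field.length).foldl (fun total_depth row =>
      if (field.getD row []).getD col 0 = 0 then
        total_depth +
          (List.range row).foldl (fun depth above_row =>
            if (field.getD above_row []).getD col 0 ≠ 0 then depth + 1 else depth) 0
      else total_depth) total_depth) 0

-- ===== PORT B =====
-- zip(*field), ported by hand: it yields exactly (min row length) columns
-- (0 when field is empty); column c collects r[c] of every row; the getD
-- default is never taken since c < every row's length. Exact on all inputs.
def pvCols (field : List (List Int)) : Nat :=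
  match field.map List.length with
  | [] => 0
  | l :: ls => ls.foldl min l

def pvTranspose (field : List (List Int)) : List (List Int) :=
  (List.range (pvCols field)).map (fun c => field.map (fun r => r.getD c 0))

def hole_depth_alt (field : List (List Int)) : Int :=
  (pvTranspose field).foldl (fun total col =>
    (col.foldl (fun (p : Int × Int) x =>
      if x = 0 then (p.1 + p.2, p.2) else (p.1, p.2 + 1)) (total, (0 : Int))).1) 0

-- ===== PRECONDITION & SPEC =====
-- Pre_ excludes exactly the inputs where Python A raises IndexError:
-- the empty field ([][0]) and ragged fields with a row shorter than row 0.
def Pre_hole_depth (field : List (List Int)) : Prop :=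
  field ≠ [] ∧ ∀ row ∈ field, (field.headD []).length ≤ row.length

instance (field : List (List Int)) : Decidable (Pre_hole_depth field) := by
  unfold Pre_hole_depth; infer_instance

def pvWitness_hole_depth : List (List Int) := [[1, 0], [0, 0], [2, 3]]

def Spec_hole_depth (field : List (List Int)) (out : Int) : Prop := out = hole_depth_alt field
instance (field : List (List Int)) (out : Int) : Decidable (Spec_hole_depth field out) := by unfold Spec_hole_depth; infer_instance

-- ===== CLAIM (what is proved, stated in full; the proofs are below) =====
def Claim_equal_hole_depth : Prop := ∀ (field : List (List Int)), Dom_hole_depth field → Pre_hole_depth field → Spec_hole_depth field (hole_depth field)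

-- ===== LEMMAS AND PROOFS =====

-- the cell field[r][c] as the ports read it
def pvg (field : List (List Int)) (r c : ℕ) : Int := (field.getD r []).getD c 0

-- A's innermost loop: number of filled cells in column c above row k
def pvcnt (field : List (List Int)) (c k : ℕ) : Int :=
  (List.range k).foldl (fun depth above_row =>
    if pvg field above_row c ≠ 0 then depth + 1 else depth) 0

-- contribution of cell (r,c)
def pvT (field : List (List Int)) (c r : ℕ) : Int :=
  if pvg field r c = 0 then pvcnt field c r else 0

theorem pvcnt_succ (field : List (List Int)) (c k : ℕ) :
    pvcnt field c (k + 1) =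
      pvcnt field c k + (if pvg field k c ≠ 0 then 1 else 0) := by
  unfold pvcnt
  rw [List.range_succ, List.foldl_append]
  simp only [List.foldl_cons, List.foldl_nil]
  split_ifs <;> simp

theorem pv_foldl_add' {α : Type} (h : α → Int) (l : List α) (a : Int) :
    l.foldl (fun t x => t + h x) a = a + (l.map h).sum := by
  induction l generalizing a with
  | nil => simp
  | cons x xs ih => simp [ih, add_assoc]

theorem pv_A_eq_sum (field : List (List Int)) :
    hole_depth field =
      ((List.range (field.headD []).length).map (fun c =>
        ((List.range field.length).map (fun r => pvT field c r)).sum)).sum := by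
  unfold hole_depth
  have h1 : ∀ c (t : Int),
      (List.range field.length).foldl (fun total_depth row =>
        if (field.getD row []).getD c 0 = 0 then
          total_depth +
            (List.range row).foldl (fun depth above_row =>
              if (field.getD above_row []).getD c 0 ≠ 0 then depth + 1 else depth) 0
        else total_depth) t
      = t + ((List.range field.length).map (fun r => pvT field c r)).sum := by
    intro c t
    have : (fun (total_depth : Int) (row : ℕ) =>
        if (field.getD row []).getD c 0 = 0 then
          total_depth +
            (List.range row).foldl (fun depth above_row =>
              if (field.getD above_row []).getD c 0 ≠ 0 then depth + 1 else depth) 0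
        else total_depth) = fun t row => t + pvT field c row := by
      funext t row
      simp only [pvT, pvg, pvcnt]
      split_ifs <;> simp
    rw [this, pv_foldl_add']
  have h2 : (fun (t : Int) (c : ℕ) =>
      (List.range field.length).foldl (fun total_depth row =>
        if (field.getD row []).getD c 0 = 0 then
          total_depth +
            (List.range row).foldl (fun depth above_row =>
              if (field.getD above_row []).getD c 0 ≠ 0 then depth + 1 else depth) 0
        else total_depth) t)
      = fun t c => t + ((List.range field.length).map (fun r => pvT field c r)).sum := by
    funext t c; exact h1 c t
  rw [h2, pv_foldl_add']
  simp

-- B's inner loop state, as a function of the remaining column and the running count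
def pvColSum : List Int → Int → Int
  | [], _ => 0
  | x :: xs, f => if x = 0 then f + pvColSum xs f else pvColSum xs (f + 1)

theorem pv_colfold (col : List Int) (t f : Int) :
    (col.foldl (fun (p : Int × Int) x =>
      if x = 0 then (p.1 + p.2, p.2) else (p.1, p.2 + 1)) (t, f)).1
    = t + pvColSum col f := by
  induction col generalizing t f with
  | nil => simp [pvColSum]
  | cons x xs ih =>
    simp only [List.foldl_cons, pvColSum]
    split_ifs with h <;> rw [ih] <;> try ring

theorem pv_M (field : List (List Int)) (c : ℕ) :
    ∀ (n k : ℕ), k + n = field.length →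
    pvColSum ((List.range' k n).map (fun r => pvg field r c)) (pvcnt field c k)
      = ((List.range n).map (fun j => pvT field c (k + j))).sum := by
  intro n
  induction n with
  | zero => intro k _; simp [pvColSum]
  | succ m ih =>
    intro k hk
    rw [List.range'_succ, List.map_cons]
    rw [List.range_succ_eq_map, List.map_cons, List.sum_cons, List.map_map]
    simp only [pvColSum, Function.comp_def, Nat.add_zero]
    have hcnt := pvcnt_succ field c k
    have harg : (fun j => pvT field c (k + (j + 1)))
        = fun j => pvT field c (k + 1 + j) := by
      funext j; congr 1; omega
    rw [harg]
    by_cases h : pvg field k c = 0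
    · rw [if_pos h]
      have : pvcnt field c (k + 1) = pvcnt field c k := by simp [hcnt, h]
      rw [← this, ih (k + 1) (by omega)]
      simp [pvT, h, this]
    · rw [if_neg h]
      have : pvcnt field c (k + 1) = pvcnt field c k + 1 := by simp [hcnt, h]
      rw [← this, ih (k + 1) (by omega)]
      simp [pvT, h]

theorem pv_colList (field : List (List Int)) (c : ℕ) :
    field.map (fun r => r.getD c 0)
      = (List.range' 0 field.length).map (fun r => pvg field r c) := by
  apply List.ext_getElem
  · simp
  · intro j h1 h2
    simp only [List.getElem_map, List.getElem_range']
    have hj : j < field.length := by simpa using h1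
    simp [pvg, List.getD_eq_getElem?_getD, List.getElem?_eq_getElem hj]

theorem pv_col_value (field : List (List Int)) (c : ℕ) (t : Int) :
    ((field.map (fun r => r.getD c 0)).foldl (fun (p : Int × Int) x =>
        if x = 0 then (p.1 + p.2, p.2) else (p.1, p.2 + 1)) (t, (0 : Int))).1
    = t + ((List.range field.length).map (fun r => pvT field c r)).sum := by
  rw [pv_colfold, pv_colList field c]
  have h0 : pvcnt field c 0 = 0 := rfl
  have hM := pv_M field c field.length 0 (by omega)
  rw [h0] at hM
  simp only [Nat.zero_add] at hM
  rw [hM]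

theorem pv_B_fold (field : List (List Int)) (cs : List ℕ) (t : Int) :
    ((cs.map (fun c => field.map (fun r => r.getD c 0))).foldl
      (fun total col => (col.foldl (fun (p : Int × Int) x =>
        if x = 0 then (p.1 + p.2, p.2) else (p.1, p.2 + 1)) (total, (0 : Int))).1) t)
    = t + (cs.map (fun c =>
        ((List.range field.length).map (fun r => pvT field c r)).sum)).sum := by
  induction cs generalizing t with
  | nil => simp
  | cons c cs ih =>
    simp only [List.map_cons, List.foldl_cons, List.sum_cons]
    rw [pv_col_value field c t, ih]
    ring

theorem pv_foldl_min (l : List ℕ) : ∀ a, (∀ x ∈ l, a ≤ x) → l.foldl min a = a := by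
  induction l with
  | nil => intro a _; rfl
  | cons x xs ih =>
    intro a h
    simp only [List.foldl_cons]
    rw [min_eq_left (h x (by simp))]
    exact ih a (fun y hy => h y (by simp [hy]))

theorem pv_cols_eq (field : List (List Int)) (hne : field ≠ [])
    (hw : ∀ row ∈ field, (field.headD []).length ≤ row.length) :
    pvCols field = (field.headD []).length := by
  cases field with
  | nil => exact absurd rfl hne
  | cons r0 rest =>
    simp only [pvCols, List.map_cons, List.headD_cons]
    exact pv_foldl_min _ _ (fun x hx => by
      obtain ⟨row, hrow, hlen⟩ := List.mem_map.mp hx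
      exact hlen ▸ hw row (by simp [hrow]))

theorem pv_B_eq_sum (field : List (List Int)) (hne : field ≠ [])
    (hw : ∀ row ∈ field, (field.headD []).length ≤ row.length) :
    hole_depth_alt field =
      ((List.range (field.headD []).length).map (fun c =>
        ((List.range field.length).map (fun r => pvT field c r)).sum)).sum := by
  unfold hole_depth_alt pvTranspose
  rw [pv_cols_eq field hne hw, pv_B_fold]
  simp

-- ===== VERDICT (by name: the statement is the Claim_ definition above) =====
theorem hole_depth_spec : Claim_equal_hole_depth := by
  intro field _ hpre
  unfold Spec_hole_depth
  rw [pv_A_eq_sum, pv_B_eq_sum field hpre.1 hpre.2]
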